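-- pv_equiv track=rewrite | github.com/BBuf/how-to-optim-algorithm-in-cuda | meagtron-lm/playground.py | generate_context_data_parallel_groups
-- ===== SOURCE A (Python) =====
-- def generate_context_data_parallel_groups(world_size, tensor_model_parallel_size, pipeline_model_parallel_size, context_parallel_size):
--     """
--     Generate data parallel groups considering context parallelism.
--     """
--     assert world_size % (pipeline_model_parallel_size * tensor_model_parallel_size * context_parallel_size) == 0, "world_size must be divisible by the product of pipeline_model_parallel_size, tensor_model_parallel_size, and context_parallel_size"
--     all_data_parallel_group_ranks_with_cp = []
--     num_pipeline_model_parallel_groups = world_size // pipeline_model_parallel_size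
--
--     for i in range(pipeline_model_parallel_size):
--         start_rank = i * num_pipeline_model_parallel_groups
--         end_rank = (i + 1) * num_pipeline_model_parallel_groups
--         for j in range(tensor_model_parallel_size):
--             ranks_with_cp = range(start_rank + j, end_rank, tensor_model_parallel_size)
--             all_data_parallel_group_ranks_with_cp.append(list(ranks_with_cp))
--
--     return all_data_parallel_group_ranks_with_cp
-- ===== SOURCE B (Python) =====
-- def generate_context_data_parallel_groups(world_size, tensor_model_parallel_size, pipeline_model_parallel_size, context_parallel_size):
--     """
--     Generate data parallel groups considering context parallelism.
--     """
--     assert world_size % (pipeline_model_parallel_size * tensor_model_parallel_size * context_parallel_size) == 0, "world_size must be divisible by the product of pipeline_model_parallel_size, tensor_model_parallel_size, and context_parallel_size"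
--     num = world_size // pipeline_model_parallel_size
--     tensor = tensor_model_parallel_size
--     groups = []
--     for i in range(pipeline_model_parallel_size):
--         block = list(range(i * num, (i + 1) * num))
--         rows = [block[r:r + tensor] for r in range(0, len(block), tensor)]
--         groups.extend(list(col) for col in zip(*rows))
--     return groups
-- ===== Notes on version B (the rewrite author's own statement) =====
-- stated objective: alternative
-- what changed: B replaces A's inner loop of per-group strided ranges (range(start+j, end, tensor)) by a matrix reshape-then-transpose: each pipeline block is chunked into consecutive rows of length tensor and the groups are read off as the columns via zip(*rows).
-- outside the precondition, e.g. on generate_context_data_parallel_groups(0, 1, 2, 1): A returns [[], []], B returns []; on generate_context_data_parallel_groups(-4, 1, 2, 2): A returns [[], []], B returns []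
import Mathlib
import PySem

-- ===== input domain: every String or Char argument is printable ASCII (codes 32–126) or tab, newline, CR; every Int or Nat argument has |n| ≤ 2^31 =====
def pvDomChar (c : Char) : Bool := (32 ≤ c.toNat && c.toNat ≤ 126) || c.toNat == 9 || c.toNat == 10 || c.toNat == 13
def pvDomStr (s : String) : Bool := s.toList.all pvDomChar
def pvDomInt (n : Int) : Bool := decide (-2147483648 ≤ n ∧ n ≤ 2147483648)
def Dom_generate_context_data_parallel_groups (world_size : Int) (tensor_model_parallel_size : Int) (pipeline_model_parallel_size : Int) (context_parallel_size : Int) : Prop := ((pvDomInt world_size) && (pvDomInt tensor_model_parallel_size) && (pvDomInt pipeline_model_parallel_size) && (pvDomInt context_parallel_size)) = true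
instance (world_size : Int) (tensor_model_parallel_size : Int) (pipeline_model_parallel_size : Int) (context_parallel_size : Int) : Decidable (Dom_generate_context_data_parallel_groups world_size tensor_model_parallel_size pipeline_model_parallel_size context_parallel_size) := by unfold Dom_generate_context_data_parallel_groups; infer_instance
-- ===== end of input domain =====

-- B reshapes each pipeline block into rows of length tensor_model_parallel_size and reads the
-- groups off as the columns via zip-transpose, instead of A's per-group strided ranges
-- (objective: alternative).

-- ===== PORT A =====
def generate_context_data_parallel_groups (world_size : Int) (tensor_model_parallel_size : Int) (pipeline_model_parallel_size : Int) (context_parallel_size : Int) : List (List Int) :=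
  let num := PySem.Int.floordiv world_size pipeline_model_parallel_size
  (PySem.List.pyRange 0 pipeline_model_parallel_size 1).foldl (fun acc i =>
    let start_rank := i * num
    let end_rank := (i + 1) * num
    (PySem.List.pyRange 0 tensor_model_parallel_size 1).foldl (fun acc2 j =>
      acc2 ++ [PySem.List.pyRange (start_rank + j) end_rank tensor_model_parallel_size]) acc) []

-- ===== PORT B =====
-- pvZip ports Python's zip(*rows): emit the tuple of heads while no row is exhausted.
-- The fuel (first row's length) bounds zip's output length, so pvZip is exact for zip(*rows).
def pvZipGo : Nat → List (List Int) → List (List Int)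
  | 0, _ => []
  | n + 1, rows =>
    if rows.any List.isEmpty then []
    else (rows.map (fun r => r.headD 0)) :: pvZipGo n (rows.map List.tail)

def pvZip (rows : List (List Int)) : List (List Int) :=
  if rows.isEmpty then [] else pvZipGo (rows.headD []).length rows

def generate_context_data_parallel_groups_alt (world_size : Int) (tensor_model_parallel_size : Int) (pipeline_model_parallel_size : Int) (context_parallel_size : Int) : List (List Int) :=
  let num := PySem.Int.floordiv world_size pipeline_model_parallel_size
  let tensor := tensor_model_parallel_size
  (PySem.List.pyRange 0 pipeline_model_parallel_size 1).foldl (fun acc i =>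
    let block := PySem.List.pyRange (i * num) ((i + 1) * num) 1
    let rows := (PySem.List.pyRange 0 ((block.length : Int)) tensor).map
      (fun r => PySem.List.slice block (some r) (some (r + tensor)))
    acc ++ pvZip rows) []

-- ===== PRECONDITION & SPEC =====
-- Pre_ requires the assert's modulus to be nonzero (else ZeroDivisionError) and to divide
-- world_size (else AssertionError); it additionally EXCLUDES the degenerate corner
-- world_size ≤ 0 with positive pipeline and tensor sizes, where A returns
-- pipeline·tensor empty groups manufactured by empty range()s while B naturally returns []
-- — both corner behaviours are defensible and no caller would specify either.
def Pre_generate_context_data_parallel_groups (world_size : Int) (tensor_model_parallel_size : Int) (pipeline_model_parallel_size : Int) (context_parallel_size : Int) : Prop :=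
  pipeline_model_parallel_size * tensor_model_parallel_size * context_parallel_size ≠ 0 ∧
  (pipeline_model_parallel_size * tensor_model_parallel_size * context_parallel_size) ∣ world_size ∧
  (0 < world_size ∨ pipeline_model_parallel_size < 0 ∨ tensor_model_parallel_size < 0)
instance (world_size : Int) (tensor_model_parallel_size : Int) (pipeline_model_parallel_size : Int) (context_parallel_size : Int) : Decidable (Pre_generate_context_data_parallel_groups world_size tensor_model_parallel_size pipeline_model_parallel_size context_parallel_size) := by unfold Pre_generate_context_data_parallel_groups; infer_instance
def pvWitness_generate_context_data_parallel_groups : Int × Int × Int × Int := (8, 2, 2, 1)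

def Spec_generate_context_data_parallel_groups (world_size : Int) (tensor_model_parallel_size : Int) (pipeline_model_parallel_size : Int) (context_parallel_size : Int) (out : List (List Int)) : Prop := out = generate_context_data_parallel_groups_alt world_size tensor_model_parallel_size pipeline_model_parallel_size context_parallel_size
instance (world_size : Int) (tensor_model_parallel_size : Int) (pipeline_model_parallel_size : Int) (context_parallel_size : Int) (out : List (List Int)) : Decidable (Spec_generate_context_data_parallel_groups world_size tensor_model_parallel_size pipeline_model_parallel_size context_parallel_size out) := by unfold Spec_generate_context_data_parallel_groups; infer_instance

-- ===== CLAIM (what is proved, stated in full; the proofs are below) =====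
def Claim_equal_generate_context_data_parallel_groups : Prop := ∀ (world_size : Int) (tensor_model_parallel_size : Int) (pipeline_model_parallel_size : Int) (context_parallel_size : Int), Dom_generate_context_data_parallel_groups world_size tensor_model_parallel_size pipeline_model_parallel_size context_parallel_size → Pre_generate_context_data_parallel_groups world_size tensor_model_parallel_size pipeline_model_parallel_size context_parallel_size → Spec_generate_context_data_parallel_groups world_size tensor_model_parallel_size pipeline_model_parallel_size context_parallel_size (generate_context_data_parallel_groups world_size tensor_model_parallel_size pipeline_model_parallel_size context_parallel_size)

-- ===== LEMMAS AND PROOFS =====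

-- range(a, b, step) with a negative step and a ≤ b is empty.
lemma pyRange_nil_of_neg (a b t : Int) (ht : t < 0) (hab : a ≤ b) :
    PySem.List.pyRange a b t = [] := by
  unfold PySem.List.pyRange
  rw [if_neg (by omega)]
  simp only
  rw [if_neg (by omega), if_neg (by omega)]
  simp

-- A slice of a step-1 range (within bounds) is again a step-1 range.
lemma slice_pyRange_one (s e a b : Int) (ha : 0 ≤ a) (hab : a ≤ b) (hbe : s + b ≤ e) :
    PySem.List.slice (PySem.List.pyRange s e 1) (some a) (some b) =
      PySem.List.pyRange (s + a) (s + b) 1 := by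
  rw [PySem.List.slice_toNat _ ha (le_trans ha hab)]
  apply List.ext_getElem
  · simp [PySem.List.length_pyRange_one]
    omega
  · intro n h1 h2
    simp only [List.getElem_take, List.getElem_drop]
    rw [PySem.List.getElem_pyRange_one, PySem.List.getElem_pyRange_one]
    have hA : (a.toNat : Int) = a := Int.toNat_of_nonneg ha
    push_cast
    omega

-- Column j of the block reshaped into rows of length t equals A's strided range, when t divides the block length.
lemma col_eq (t j s num : Int) (hj0 : 0 ≤ j) (hjt : j < t) (hd : t ∣ num) :
    ((PySem.List.pyRange 0 ((num.toNat : Int)) t).map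
      (fun r => PySem.List.pyGetD (PySem.List.slice (PySem.List.pyRange s (s + num) 1) (some r) (some (r + t))) j 0))
      = PySem.List.pyRange (s + j) (s + num) t := by
  have ht : 0 < t := by omega
  obtain ⟨k0, hk0⟩ := hd
  rw [PySem.List.pyRange_of_pos _ _ ht, PySem.List.pyRange_of_pos _ _ ht]
  by_cases hnum : 0 < num
  case neg =>
    rw [if_neg (by omega), if_neg (by omega)]
    simp
  case pos =>
    have hk0pos : 0 < k0 := by nlinarith
    have hbound : (num.toNat : Int) = num := Int.toNat_of_nonneg (le_of_lt hnum)
    have htle : t ≤ num := by nlinarith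
    rw [if_pos (by omega), if_pos (by omega)]
    have hc1 : ((num.toNat : Int) - 0 + t - 1) / t = k0 := by
      rw [hbound, hk0]
      have : t * k0 - 0 + t - 1 = (t - 1) + k0 * t := by ring
      rw [this, Int.add_mul_ediv_right _ _ (by omega)]
      rw [Int.ediv_eq_zero_of_lt (by omega) (by omega)]
      omega
    have hc2 : (s + num - (s + j) + t - 1) / t = k0 := by
      have : s + num - (s + j) + t - 1 = (t - 1 - j) + k0 * t := by rw [hk0]; ring
      rw [this, Int.add_mul_ediv_right _ _ (by omega)]
      rw [Int.ediv_eq_zero_of_lt (by omega) (by omega)]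
      omega
    rw [hc1, hc2, List.map_map]
    apply List.map_congr_left
    intro m hm
    simp only [Function.comp_apply]
    have hmk : (m : Int) < k0 := by
      rw [List.mem_range] at hm
      have := Int.toNat_of_nonneg (show (0:Int) ≤ k0 by omega)
      omega
    have hrow : PySem.List.slice (PySem.List.pyRange s (s + num) 1) (some (0 + t * (m : Int))) (some (0 + t * (m : Int) + t)) =
        PySem.List.pyRange (s + (0 + t * (m : Int))) (s + (0 + t * (m : Int) + t)) 1 := by
      apply slice_pyRange_one
      · positivity
      · omega
      · rw [hk0]; nlinarith
    rw [hrow]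
    rw [PySem.List.pyGetD_eq_getElem _ _ hj0
      (by rw [PySem.List.length_pyRange_one]; omega)]
    rw [PySem.List.getElem_pyRange_one]
    have : (j.toNat : Int) = j := Int.toNat_of_nonneg hj0
    omega

-- zip of a nonempty list of rows of common length L is the list of the L columns.
lemma zip_uniform (L : Nat) : ∀ (rows : List (List Int)), rows ≠ [] →
    (∀ r ∈ rows, r.length = L) →
    pvZipGo L rows = (List.range L).map (fun j => rows.map (fun r => r.getD j 0)) := by
  induction L with
  | zero => intro rows _ _; simp [pvZipGo]
  | succ n ih =>
    intro rows hne hlen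
    have hany : rows.any List.isEmpty = false := by
      simp only [List.any_eq_false]
      intro r hr
      have := hlen r hr
      cases r with
      | nil => simp at this
      | cons a l => simp
    rw [pvZipGo, if_neg (by simp [hany])]
    have htne : rows.map List.tail ≠ [] := by
      simpa using hne
    have htlen : ∀ r ∈ rows.map List.tail, r.length = n := by
      intro r hr
      obtain ⟨r0, hr0, rfl⟩ := List.mem_map.mp hr
      have := hlen r0 hr0
      cases r0 with
      | nil => simp at this
      | cons a l => simpa using this
    rw [ih (rows.map List.tail) htne htlen]
    rw [List.range_succ_eq_map, List.map_cons, List.map_map]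
    congr 1
    · apply List.map_congr_left
      intro r _
      cases r <;> simp
    · apply List.map_congr_left
      intro j _
      simp only [Function.comp_apply, List.map_map]
      apply List.map_congr_left
      intro r _
      cases r <;> simp

-- The reshaped-and-transposed block equals A's family of strided ranges.
lemma zip_rows_eq (t s num : Int) (ht : 0 < t) (hnum : 0 < num) (hdvd : t ∣ num) :
    pvZip ((PySem.List.pyRange 0 ((num.toNat : Int)) t).map
      (fun r => PySem.List.slice (PySem.List.pyRange s (s + num) 1) (some r) (some (r + t)))) =
    (PySem.List.pyRange 0 t 1).map (fun j => PySem.List.pyRange (s + j) (s + num) t) := by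
  have hnumc : ((num.toNat : Int)) = num := Int.toNat_of_nonneg (le_of_lt hnum)
  -- each row is a step-1 range of length t
  have hrow : ∀ r ∈ PySem.List.pyRange 0 ((num.toNat : Int)) t,
      PySem.List.slice (PySem.List.pyRange s (s + num) 1) (some r) (some (r + t)) =
        PySem.List.pyRange (s + r) (s + (r + t)) 1 := by
    intro r hr
    rw [PySem.List.mem_pyRange_iff_of_pos ht] at hr
    obtain ⟨hr0, hrlt, hrdvd⟩ := hr
    have hrt : r + t ≤ num := by
      have h1 : t ∣ num - r := by
        simpa using Int.dvd_sub hdvd (by simpa using hrdvd)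
      have h2 : t ≤ num - r := Int.le_of_dvd (by omega) h1
      omega
    exact slice_pyRange_one s (s + num) r (r + t) hr0 (by omega) (by omega)
  set rows := (PySem.List.pyRange 0 ((num.toNat : Int)) t).map
      (fun r => PySem.List.slice (PySem.List.pyRange s (s + num) 1) (some r) (some (r + t))) with hrows
  have hlen : ∀ row ∈ rows, row.length = t.toNat := by
    intro row hm
    obtain ⟨r, hr, rfl⟩ := List.mem_map.mp hm
    rw [hrow r hr, PySem.List.length_pyRange_one]
    omega
  have hne : rows ≠ [] := by
    have h0 : (0 : Int) ∈ PySem.List.pyRange 0 ((num.toNat : Int)) t := by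
      rw [PySem.List.mem_pyRange_iff_of_pos ht]
      refine ⟨le_refl 0, by omega, by simp⟩
    intro hcon
    have := List.mem_map_of_mem (f := fun r => PySem.List.slice (PySem.List.pyRange s (s + num) 1) (some r) (some (r + t))) h0
    rw [← hrows, hcon] at this
    simp at this
  have hheadm : rows.headD [] ∈ rows := by
    cases hr : rows with
    | nil => exact absurd hr hne
    | cons a l => simp
  have hhead : (rows.headD []).length = t.toNat := hlen _ hheadm
  rw [pvZip, if_neg (by simpa using hne), hhead]
  rw [zip_uniform t.toNat rows hne hlen]
  rw [PySem.List.pyRange_one 0 t, List.map_map]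
  have htc : (t - 0).toNat = t.toNat := by omega
  rw [htc]
  apply List.map_congr_left
  intro j hj
  rw [List.mem_range] at hj
  have hjt : (j : Int) < t := by omega
  simp only [Function.comp_apply]
  rw [hrows, List.map_map]
  have hcols : ((PySem.List.pyRange 0 ((num.toNat : Int)) t).map
      (fun r => PySem.List.pyGetD (PySem.List.slice (PySem.List.pyRange s (s + num) 1) (some r) (some (r + t))) (j : Int) 0))
        = PySem.List.pyRange (s + (j : Int)) (s + num) t :=
    col_eq t (j : Int) s num (by positivity) hjt hdvd
  calc ((PySem.List.pyRange 0 ((num.toNat : Int)) t).map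
        ((fun r => r.getD j 0) ∘ fun r => PySem.List.slice (PySem.List.pyRange s (s + num) 1) (some r) (some (r + t))))
      = (PySem.List.pyRange 0 ((num.toNat : Int)) t).map
        (fun r => PySem.List.pyGetD (PySem.List.slice (PySem.List.pyRange s (s + num) 1) (some r) (some (r + t))) (j : Int) 0) := by
        apply List.map_congr_left
        intro r _
        simp [PySem.List.pyGetD_natCast]
    _ = PySem.List.pyRange (s + (j : Int)) (s + num) t := hcols
    _ = PySem.List.pyRange (s + (0 + (j : Int))) (s + num) t := by norm_num

-- ===== VERDICT (by name: the statement is the Claim_ definition above) =====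
theorem generate_context_data_parallel_groups_spec : Claim_equal_generate_context_data_parallel_groups := by
  intro ws t p c _hdom hpre
  unfold Spec_generate_context_data_parallel_groups
  obtain ⟨hmne, hdvd, hpos⟩ := hpre
  unfold generate_context_data_parallel_groups generate_context_data_parallel_groups_alt
  apply PySem.List.foldl_congr_mem
  intro acc i hi
  rw [PySem.List.mem_pyRange_one] at hi
  have hp : 0 < p := by omega
  by_cases ht : 0 < t
  case pos =>
    have hws : 0 < ws := by
      rcases hpos with h | h | h
      · exact h
      · omega
      · omega
    have hpd : p ∣ ws := Dvd.dvd.trans ⟨t * c, by ring⟩ hdvd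
    obtain ⟨q, hq⟩ := hpd
    have hfd : PySem.Int.floordiv ws p = q := by
      rw [PySem.Int.floordiv_eq_ediv_of_pos hp, hq, Int.mul_ediv_cancel_left _ (by omega)]
    have hqpos : 0 < q := by nlinarith
    have htdvd : t ∣ PySem.Int.floordiv ws p := by
      obtain ⟨q2, hq2⟩ := hdvd
      rw [PySem.Int.floordiv_eq_ediv_of_pos hp, hq2]
      have : p * t * c * q2 = (t * c * q2) * p := by ring
      rw [this, Int.mul_ediv_cancel _ (by omega)]
      exact ⟨c * q2, by ring⟩
    have hnum : 0 < PySem.Int.floordiv ws p := by rw [hfd]; exact hqpos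
    rw [PySem.List.foldl_append_singleton_eq_map]
    congr 1
    have hstep : (i + 1) * PySem.Int.floordiv ws p = i * PySem.Int.floordiv ws p + PySem.Int.floordiv ws p := by ring
    rw [hstep]
    have hblen : ((PySem.List.pyRange (i * PySem.Int.floordiv ws p) (i * PySem.Int.floordiv ws p + PySem.Int.floordiv ws p) 1).length : Int)
        = (((PySem.Int.floordiv ws p).toNat : Int)) := by
      rw [PySem.List.length_pyRange_one]
      congr 1
      omega
    rw [hblen]
    exact (zip_rows_eq t (i * PySem.Int.floordiv ws p) (PySem.Int.floordiv ws p) ht hnum htdvd).symm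
  case neg =>
    have ht' : t < 0 := by
      rcases lt_trichotomy t 0 with h | h | h
      · exact h
      · exfalso; apply hmne; rw [h]; ring
      · exact absurd h ht
    rw [PySem.List.pyRange_one_eq_nil (by omega)]
    simp only [List.foldl_nil]
    rw [pyRange_nil_of_neg 0 _ t ht' (by positivity)]
    simp [pvZip]
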